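-- pv_equiv track=rewrite | github.com/jeageon/RBS_cal | plasmid_designer/plasmid_safezone_engine.py | _intersect_intervals
-- ===== SOURCE A (Python) =====
-- from typing import Dict, Iterable, List, Optional, Sequence, Tuple
--
-- Interval = Tuple[int, int]
--
-- def _merge_intervals(intervals: Sequence[Interval], length: int) -> List[Interval]:
--     if not intervals:
--         return []
--     items = sorted(
--         [iv for iv in intervals if iv[0] < iv[1] and iv[0] >= 0 and iv[1] <= length],
--         key=lambda x: x[0],
--     )
--     merged: List[Interval] = []
--     cur_s, cur_e = items[0]
--     for s, e in items[1:]: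
--         if s <= cur_e:
--             if e > cur_e:
--                 cur_e = e
--         else:
--             merged.append((cur_s, cur_e))
--             cur_s, cur_e = s, e
--     merged.append((cur_s, cur_e))
--     return merged
--
-- def _intersect_intervals(left: Sequence[Interval], right: Sequence[Interval]) -> List[Interval]:
--     if not left or not right:
--         return []
--
--     max_len = 0
--     if left:
--         max_len = max(max_len, max(i[1] for i in left))
--     if right:
--         max_len = max(max_len, max(i[1] for i in right))
--
--     l_intervals = _merge_intervals(left, max_len)
--     r_intervals = _merge_intervals(right, max_len)
--     result: List[Interval] = []
--     i = 0
--     j = 0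
--
--     while i < len(l_intervals) and j < len(r_intervals):
--         s = max(l_intervals[i][0], r_intervals[j][0])
--         e = min(l_intervals[i][1], r_intervals[j][1])
--         if s < e:
--             result.append((s, e))
--
--         if l_intervals[i][1] <= r_intervals[j][1]:
--             i += 1
--         else:
--             j += 1
--     return result
-- ===== SOURCE B (Python) =====
-- from typing import List, Sequence, Tuple
--
-- Interval = Tuple[int, int]
--
-- def _coalesce(items: List[Interval]) -> List[Interval]:
--     # items sorted by start; union touching/overlapping runs
--     if not items:
--         return []
--     merged: List[Interval] = []
--     cur_s, cur_e = items[0]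
--     for s, e in items[1:]:
--         if s <= cur_e:
--             if e > cur_e:
--                 cur_e = e
--         else:
--             merged.append((cur_s, cur_e))
--             cur_s, cur_e = s, e
--     merged.append((cur_s, cur_e))
--     return merged
--
-- def _intersect_intervals(left: Sequence[Interval], right: Sequence[Interval]) -> List[Interval]:
--     if not left or not right:
--         return []
--     pieces = [
--         (max(ls, rs), min(le, re))
--         for ls, le in left if 0 <= ls < le
--         for rs, re in right if 0 <= rs < re
--         if max(ls, rs) < min(le, re)
--     ]
--     pieces.sort(key=lambda p: p[0])
--     return _coalesce(pieces)
-- ===== Notes on version B (the rewrite author's own statement) =====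
-- stated objective: alternative
-- what changed: B replaces A's per-side sort-and-merge followed by a two-pointer sweep with a product construction: it takes every pairwise intersection of valid left/right intervals, sorts those pieces once, and coalesces them in a single merge pass; Pre_ excludes only the inputs where A raises IndexError (both lists nonempty but one side without a valid 0<=start<end interval).
import Mathlib
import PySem

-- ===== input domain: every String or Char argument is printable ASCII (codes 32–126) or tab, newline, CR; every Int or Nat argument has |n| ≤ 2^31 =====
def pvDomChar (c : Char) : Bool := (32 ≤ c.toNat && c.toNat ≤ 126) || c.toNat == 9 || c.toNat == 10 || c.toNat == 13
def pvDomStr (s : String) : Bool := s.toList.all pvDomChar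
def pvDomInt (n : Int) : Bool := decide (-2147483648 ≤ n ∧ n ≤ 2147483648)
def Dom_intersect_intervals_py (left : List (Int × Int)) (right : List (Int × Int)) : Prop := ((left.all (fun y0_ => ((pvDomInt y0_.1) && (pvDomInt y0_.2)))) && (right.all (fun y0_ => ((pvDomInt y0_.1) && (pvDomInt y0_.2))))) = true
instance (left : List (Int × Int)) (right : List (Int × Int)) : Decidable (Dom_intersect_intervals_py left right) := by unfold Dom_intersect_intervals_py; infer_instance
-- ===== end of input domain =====

-- B re-implements A's intersection (merge each side, then a two-pointer sweep) as: pairwise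
-- piece intersections of the valid intervals, sorted once and coalesced in one merge pass;
-- objective: alternative algorithm of similar cost.

-- ===== PORT A =====

-- shared merge loop: both Pythons contain this exact accumulation loop
-- (A inside _merge_intervals, B as _coalesce); cur_s/cur_e carried in the arguments,
-- appending to `merged` becomes consing onto the recursive result.
def pvMergeLoop : Int → Int → List (Int × Int) → List (Int × Int)
  | cs, ce, [] => [(cs, ce)]
  | cs, ce, (s, e) :: rest =>
    if s ≤ ce then pvMergeLoop cs (if e > ce then e else ce) rest
    else (cs, ce) :: pvMergeLoop s e rest

-- `items[0]` then the loop over `items[1:]`; on [] Python raises IndexError (excluded by Pre_)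
def pvMergeTop : List (Int × Int) → List (Int × Int)
  | [] => []
  | (s, e) :: rest => pvMergeLoop s e rest

-- max(i[1] for i in l); Python raises on [] (unreachable: guarded by `if left:`)
def pvMaxEnd : List (Int × Int) → Int
  | [] => 0
  | p :: t => t.foldl (fun m q => max m q.2) p.2

-- _merge_intervals(intervals, length)
def pvMergeIntervals (intervals : List (Int × Int)) (length : Int) : List (Int × Int) :=
  if intervals = [] then []
  else pvMergeTop (PySem.List.sorted
    (intervals.filter fun iv => decide (iv.1 < iv.2) && decide (0 ≤ iv.1) && decide (iv.2 ≤ length))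
    (fun x => x.1) false)

-- the two-pointer while loop; indices i/j become the suffixes of the two lists
def pvILoop : List (Int × Int) → List (Int × Int) → List (Int × Int)
  | (ls, le) :: lt, (rs, re) :: rt =>
    let s := max ls rs
    let e := min le re
    (if s < e then [(s, e)] else []) ++
      (if le ≤ re then pvILoop lt ((rs, re) :: rt) else pvILoop ((ls, le) :: lt) rt)
  | _, _ => []
termination_by l r => l.length + r.length
decreasing_by all_goals (simp only [List.length_cons]; omega)

def intersect_intervals_py (left : List (Int × Int)) (right : List (Int × Int)) : List (Int × Int) :=
  if left = [] ∨ right = [] then []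
  else
    let max_len : Int := 0
    let max_len := if left = [] then max_len else max max_len (pvMaxEnd left)
    let max_len := if right = [] then max_len else max max_len (pvMaxEnd right)
    pvILoop (pvMergeIntervals left max_len) (pvMergeIntervals right max_len)

-- ===== PORT B =====

def intersect_intervals_py_alt (left : List (Int × Int)) (right : List (Int × Int)) : List (Int × Int) :=
  if left = [] ∨ right = [] then []
  else
    pvMergeTop (PySem.List.sorted
      ((left.filter fun p => decide (0 ≤ p.1) && decide (p.1 < p.2)).flatMap fun l =>
        (right.filter fun p => decide (0 ≤ p.1) && decide (p.1 < p.2)).filterMap fun r =>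
          if max l.1 r.1 < min l.2 r.2 then some (max l.1 r.1, min l.2 r.2) else none)
      (fun p => p.1) false)

-- ===== PRECONDITION & SPEC =====

-- Pre_ excludes exactly the inputs on which Python A raises IndexError: both lists nonempty
-- but one side has no valid interval (0 ≤ start < end), so _merge_intervals hits items[0] on [].
def Pre_intersect_intervals_py (left : List (Int × Int)) (right : List (Int × Int)) : Prop :=
  left = [] ∨ right = [] ∨
    ((∃ p ∈ left, 0 ≤ p.1 ∧ p.1 < p.2) ∧ (∃ p ∈ right, 0 ≤ p.1 ∧ p.1 < p.2))
instance (left : List (Int × Int)) (right : List (Int × Int)) : Decidable (Pre_intersect_intervals_py left right) := by unfold Pre_intersect_intervals_py; infer_instance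

def pvWitness_intersect_intervals_py : (List (Int × Int)) × (List (Int × Int)) :=
  ([(0, 2), (5, 7)], [(1, 6)])

def Spec_intersect_intervals_py (left : List (Int × Int)) (right : List (Int × Int)) (out : List (Int × Int)) : Prop := out = intersect_intervals_py_alt left right
instance (left : List (Int × Int)) (right : List (Int × Int)) (out : List (Int × Int)) : Decidable (Spec_intersect_intervals_py left right out) := by unfold Spec_intersect_intervals_py; infer_instance

-- ===== CLAIM (what is proved, stated in full; the proofs are below) =====
def Claim_equal_intersect_intervals_py : Prop := ∀ (left : List (Int × Int)) (right : List (Int × Int)), Dom_intersect_intervals_py left right → Pre_intersect_intervals_py left right → Spec_intersect_intervals_py left right (intersect_intervals_py left right)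


-- ===== LEMMAS AND PROOFS =====

-- coverage: x lies in some half-open interval of L
def covP (L : List (Int × Int)) (x : Int) : Prop := ∃ p ∈ L, p.1 ≤ x ∧ x < p.2

-- canonical form: strictly increasing with strict gaps, every interval nonempty
def Canon (L : List (Int × Int)) : Prop :=
  List.IsChain (fun a b => a.2 < b.1) L ∧ ∀ p ∈ L, p.1 < p.2

@[simp] lemma covP_nil (x : Int) : covP [] x ↔ False := by simp [covP]

@[simp] lemma covP_cons (a : Int × Int) (t : List (Int × Int)) (x : Int) :
    covP (a :: t) x ↔ (a.1 ≤ x ∧ x < a.2) ∨ covP t x := by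
  simp [covP]

lemma canon_nil : Canon ([] : List (Int × Int)) := ⟨List.isChain_nil, by simp⟩

lemma canon_of_cons {a : Int × Int} {t : List (Int × Int)} (h : Canon (a :: t)) : Canon t :=
  ⟨h.1.tail, fun p hp => h.2 p (List.mem_cons_of_mem _ hp)⟩

lemma canon_tail_lt {a : Int × Int} {t : List (Int × Int)} (h : Canon (a :: t)) :
    ∀ q ∈ t, a.2 < q.1 := by
  induction t generalizing a with
  | nil => simp
  | cons b t ih =>
    intro q hq
    have hab : a.2 < b.1 := (List.isChain_cons_cons.mp h.1).1
    rcases List.mem_cons.mp hq with rfl | hq'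
    · exact hab
    · have hb : Canon (b :: t) := canon_of_cons h
      have h1 := ih hb q hq'
      have h2 : b.1 < b.2 := hb.2 b (by simp)
      omega

lemma covP_lb {M : List (Int × Int)} {x a : Int} (h : ∀ p ∈ M, a < p.1) (hc : covP M x) :
    a < x := by
  rcases hc with ⟨p, hp, h1, _⟩
  have := h p hp
  omega

lemma covP_canon_lb {s e x : Int} {t : List (Int × Int)} (h : Canon ((s, e) :: t))
    (hc : covP ((s, e) :: t) x) : s ≤ x := by
  rcases (covP_cons _ _ _).mp hc with ⟨h1, _⟩ | hc'
  · exact h1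
  · have h1 := covP_lb (canon_tail_lt h) hc'
    have h2 : s < e := h.2 (s, e) (by simp)
    simp at h1
    omega

lemma covP_perm {L M : List (Int × Int)} (h : L.Perm M) (x : Int) : covP L x ↔ covP M x := by
  simp [covP, h.mem_iff]

lemma canon_ext : ∀ {L M : List (Int × Int)}, Canon L → Canon M → (∀ x, covP L x ↔ covP M x) → L = M := by
  intro L
  induction L with
  | nil =>
    intro M hL hM h
    cases M with
    | nil => rfl
    | cons b t =>
      exfalso
      have hb : covP (b :: t) b.1 :=
        (covP_cons _ _ _).mpr (Or.inl ⟨le_rfl, hM.2 b (by simp)⟩)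
      rw [← h] at hb
      simp at hb
  | cons a t1 ih =>
    intro M hL hM h
    cases M with
    | nil =>
      exfalso
      have ha : covP (a :: t1) a.1 :=
        (covP_cons _ _ _).mpr (Or.inl ⟨le_rfl, hL.2 a (by simp)⟩)
      rw [h] at ha
      simp at ha
    | cons b t2 =>
      obtain ⟨s1, e1⟩ := a
      obtain ⟨s2, e2⟩ := b
      have v1 : s1 < e1 := hL.2 (s1, e1) (by simp)
      have v2 : s2 < e2 := hM.2 (s2, e2) (by simp)
      have hs : s1 = s2 := by
        have h1 : covP ((s1, e1) :: t1) s1 := (covP_cons _ _ _).mpr (Or.inl ⟨le_rfl, v1⟩)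
        have h2 : covP ((s2, e2) :: t2) s2 := (covP_cons _ _ _).mpr (Or.inl ⟨le_rfl, v2⟩)
        have h3 := covP_canon_lb hM ((h s1).mp h1)
        have h4 := covP_canon_lb hL ((h s2).mpr h2)
        omega
      have n1 : ¬ covP ((s1, e1) :: t1) e1 := by
        rw [covP_cons]
        rintro (⟨_, hlt⟩ | hc)
        · omega
        · have := covP_lb (canon_tail_lt hL) hc
          simp at this
      have n2 : ¬ covP ((s2, e2) :: t2) e2 := by
        rw [covP_cons]
        rintro (⟨_, hlt⟩ | hc)
        · omega
        · have := covP_lb (canon_tail_lt hM) hc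
          simp at this
      have he : e1 = e2 := by
        by_contra hne
        rcases lt_or_gt_of_ne hne with hlt | hgt
        · exact n1 ((h e1).mpr ((covP_cons _ _ _).mpr (Or.inl ⟨by omega, by omega⟩)))
        · exact n2 ((h e2).mp ((covP_cons _ _ _).mpr (Or.inl ⟨by omega, by omega⟩)))
      subst hs
      subst he
      have htail : ∀ x, covP t1 x ↔ covP t2 x := by
        intro x
        by_cases hx : x < e1
        · constructor
          · intro hc
            have := covP_lb (canon_tail_lt hL) hc
            simp at this
            omega
          · intro hc
            have := covP_lb (canon_tail_lt hM) hc
            simp at this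
            omega
        · have hhd : ¬ (s1 ≤ x ∧ x < e1) := by omega
          have hL' := covP_cons (s1, e1) t1 x
          have hM' := covP_cons (s1, e1) t2 x
          rw [or_iff_right hhd] at hL' hM'
          rw [← hL', h x, hM']
      have := ih (canon_of_cons hL) (canon_of_cons hM) htail
      rw [this]

lemma mergeLoop_head : ∀ (rest : List (Int × Int)) (cs ce : Int),
    ∃ ce' t, pvMergeLoop cs ce rest = (cs, ce') :: t := by
  intro rest
  induction rest with
  | nil => intro cs ce; exact ⟨ce, [], rfl⟩
  | cons p rest ih =>
    intro cs ce
    obtain ⟨s, e⟩ := p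
    by_cases h : s ≤ ce
    · simpa [pvMergeLoop, h] using ih cs (if e > ce then e else ce)
    · exact ⟨ce, pvMergeLoop s e rest, by simp [pvMergeLoop, h]⟩

lemma merge_spec : ∀ (rest : List (Int × Int)) (cs ce : Int), cs < ce →
    (∀ p ∈ rest, p.1 < p.2) → (∀ p ∈ rest, cs ≤ p.1) →
    rest.Pairwise (fun a b => a.1 ≤ b.1) →
    Canon (pvMergeLoop cs ce rest) ∧
      ∀ x, covP (pvMergeLoop cs ce rest) x ↔ ((cs ≤ x ∧ x < ce) ∨ covP rest x) := by
  intro rest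
  induction rest with
  | nil =>
    intro cs ce h _ _ _
    refine ⟨⟨List.isChain_singleton _, ?_⟩, ?_⟩
    · intro p hp
      simp [pvMergeLoop] at hp
      subst hp
      exact h
    intro x
    simp [pvMergeLoop]
  | cons p rest ih =>
    intro cs ce hce hv hge hp
    obtain ⟨s, e⟩ := p
    have hs_cs : cs ≤ s := hge (s, e) (by simp)
    have hse : s < e := hv (s, e) (by simp)
    have hv' : ∀ q ∈ rest, q.1 < q.2 := fun q hq => hv q (by simp [hq])
    have hs_rest : ∀ q ∈ rest, s ≤ q.1 := fun q hq => (List.pairwise_cons.mp hp).1 q hq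
    have hp' := (List.pairwise_cons.mp hp).2
    by_cases h : s ≤ ce
    · have hge' : ∀ q ∈ rest, cs ≤ q.1 := fun q hq => le_trans hs_cs (hs_rest q hq)
      have hce' : cs < (if e > ce then e else ce) := by split_ifs <;> omega
      obtain ⟨hc, hcov⟩ := ih cs (if e > ce then e else ce) hce' hv' hge' hp'
      have heq : pvMergeLoop cs ce ((s, e) :: rest) =
          pvMergeLoop cs (if e > ce then e else ce) rest := by
        simp [pvMergeLoop, h]
      refine ⟨heq ▸ hc, ?_⟩
      intro x
      rw [heq, hcov x, covP_cons]
      by_cases hcx : covP rest x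
      · simp [hcx]
      · simp only [hcx, or_false]
        split_ifs with h' <;> constructor <;> intro <;> omega
    · obtain ⟨hc, hcov⟩ := ih s e hse hv' hs_rest hp'
      have heq : pvMergeLoop cs ce ((s, e) :: rest) = (cs, ce) :: pvMergeLoop s e rest := by
        simp [pvMergeLoop, h]
      refine ⟨⟨?_, ?_⟩, ?_⟩
      · rw [heq]
        obtain ⟨ce', t, hm⟩ := mergeLoop_head rest s e
        rw [hm]
        refine List.isChain_cons_cons.mpr ⟨by simp; omega, ?_⟩
        rw [← hm]
        exact hc.1
      · intro q hq
        rw [heq] at hq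
        rcases List.mem_cons.mp hq with rfl | hq'
        · exact hce
        · exact hc.2 q hq'
      · intro x
        rw [heq, covP_cons, hcov x, covP_cons]

lemma mergeTop_spec (items : List (Int × Int)) (hv : ∀ p ∈ items, p.1 < p.2)
    (hp : items.Pairwise (fun a b => a.1 ≤ b.1)) :
    Canon (pvMergeTop items) ∧ ∀ x, covP (pvMergeTop items) x ↔ covP items x := by
  cases items with
  | nil => exact ⟨canon_nil, by simp [pvMergeTop]⟩
  | cons a rest =>
    obtain ⟨s, e⟩ := a
    have hse : s < e := hv (s, e) (by simp)
    have hv' : ∀ q ∈ rest, q.1 < q.2 := fun q hq => hv q (by simp [hq])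
    have hge : ∀ q ∈ rest, s ≤ q.1 := fun q hq => (List.pairwise_cons.mp hp).1 q hq
    obtain ⟨hc, hcov⟩ := merge_spec rest s e hse hv' hge (List.pairwise_cons.mp hp).2
    refine ⟨hc, ?_⟩
    intro x
    rw [show pvMergeTop ((s, e) :: rest) = pvMergeLoop s e rest from rfl, hcov x, covP_cons]

lemma foldl_max2_le : ∀ (t : List (Int × Int)) (a : Int),
    a ≤ t.foldl (fun m q => max m q.2) a ∧ ∀ p ∈ t, p.2 ≤ t.foldl (fun m q => max m q.2) a := by
  intro t
  induction t with
  | nil => intro a; simp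
  | cons q t ih =>
    intro a
    have h1 := (ih (max a q.2)).1
    refine ⟨le_trans (le_max_left _ _) h1, ?_⟩
    intro p hp
    rcases List.mem_cons.mp hp with rfl | hp'
    · exact le_trans (le_max_right _ _) h1
    · exact (ih (max a q.2)).2 p hp'

lemma maxEnd_bound : ∀ (l : List (Int × Int)), ∀ p ∈ l, p.2 ≤ pvMaxEnd l := by
  intro l
  cases l with
  | nil => simp
  | cons a t =>
    intro p hp
    rcases List.mem_cons.mp hp with rfl | hp'
    · exact (foldl_max2_le t p.2).1
    · exact (foldl_max2_le t a.2).2 p hp'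

lemma mergeIntervals_spec (l : List (Int × Int)) (len : Int) (hb : ∀ p ∈ l, p.2 ≤ len) :
    Canon (pvMergeIntervals l len) ∧
      ∀ x, covP (pvMergeIntervals l len) x ↔
        covP (l.filter fun p => decide (0 ≤ p.1) && decide (p.1 < p.2)) x := by
  by_cases hl : l = []
  · subst hl
    exact ⟨by simp [pvMergeIntervals, canon_nil], by simp [pvMergeIntervals]⟩
  · have hfe : (l.filter fun iv => decide (iv.1 < iv.2) && decide (0 ≤ iv.1) && decide (iv.2 ≤ len))
        = l.filter fun p => decide (0 ≤ p.1) && decide (p.1 < p.2) := by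
      apply List.filter_congr
      intro p hp
      have h3 : decide (p.2 ≤ len) = true := decide_eq_true (hb p hp)
      rw [h3, Bool.and_true]
      exact Bool.and_comm _ _
    have hperm : (PySem.List.sorted
        (l.filter fun iv => decide (iv.1 < iv.2) && decide (0 ≤ iv.1) && decide (iv.2 ≤ len))
        (fun x => x.1) false).Perm
        (l.filter fun iv => decide (iv.1 < iv.2) && decide (0 ≤ iv.1) && decide (iv.2 ≤ len)) :=
      PySem.List.sorted_perm _ _ _
    have hvalid : ∀ p ∈ (PySem.List.sorted
        (l.filter fun iv => decide (iv.1 < iv.2) && decide (0 ≤ iv.1) && decide (iv.2 ≤ len))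
        (fun x => x.1) false), p.1 < p.2 := by
      intro p hp
      have := hperm.subset hp
      simp [List.mem_filter] at this
      exact this.2.1.1
    have hpw := PySem.List.sorted_pairwise
        (l.filter fun iv => decide (iv.1 < iv.2) && decide (0 ≤ iv.1) && decide (iv.2 ≤ len))
        (fun x : Int × Int => x.1)
    obtain ⟨hc, hcov⟩ := mergeTop_spec _ hvalid hpw
    refine ⟨by simpa [pvMergeIntervals, hl] using hc, ?_⟩
    intro x
    rw [show pvMergeIntervals l len = pvMergeTop (PySem.List.sorted
        (l.filter fun iv => decide (iv.1 < iv.2) && decide (0 ≤ iv.1) && decide (iv.2 ≤ len))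
        (fun x => x.1) false) from by simp [pvMergeIntervals, hl]]
    rw [hcov x, covP_perm hperm x, hfe]

lemma iloop_spec : ∀ (n : Nat) (L R : List (Int × Int)), L.length + R.length ≤ n →
    Canon L → Canon R →
    Canon (pvILoop L R) ∧ ∀ x, covP (pvILoop L R) x ↔ (covP L x ∧ covP R x) := by
  intro n
  induction n with
  | zero =>
    intro L R hn hL hR
    have hl : L = [] := by cases L <;> simp_all
    have hr : R = [] := by cases R <;> simp_all
    subst hl
    subst hr
    exact ⟨by simpa [pvILoop] using canon_nil, by simp [pvILoop]⟩
  | succ n ih =>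
    intro L R hn hL hR
    cases L with
    | nil => exact ⟨by simpa [pvILoop] using canon_nil, by simp [pvILoop]⟩
    | cons a lt =>
      cases R with
      | nil =>
        obtain ⟨ls, le⟩ := a
        exact ⟨by simpa [pvILoop] using canon_nil, by simp [pvILoop]⟩
      | cons b rt =>
        obtain ⟨ls, le⟩ := a
        obtain ⟨rs, re⟩ := b
        have hlv : ls < le := hL.2 (ls, le) (by simp)
        have hrv : rs < re := hR.2 (rs, re) (by simp)
        have hLt := canon_of_cons hL
        have hRt := canon_of_cons hR
        have hltb := canon_tail_lt hL
        have hrtb := canon_tail_lt hR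
        simp only at hltb hrtb
        by_cases hle : le ≤ re
        · have ih' := ih lt ((rs, re) :: rt) (by simp at hn ⊢; omega) hLt hR
          have heq : pvILoop ((ls, le) :: lt) ((rs, re) :: rt) =
              (if max ls rs < min le re then [(max ls rs, min le re)] else []) ++
                pvILoop lt ((rs, re) :: rt) := by
            rw [pvILoop]
            simp [hle]
          by_cases hse : max ls rs < min le re
          · rw [heq, if_pos hse, List.singleton_append]
            refine ⟨⟨?_, ?_⟩, ?_⟩
            · rcases hM' : pvILoop lt ((rs, re) :: rt) with _ | ⟨c, t⟩
              · simp
              · have hcv : c.1 < c.2 := ih'.1.2 c (by rw [hM']; simp)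
                have hcovc : covP (pvILoop lt ((rs, re) :: rt)) c.1 := by
                  rw [hM']
                  exact (covP_cons _ _ _).mpr (Or.inl ⟨le_rfl, hcv⟩)
                have hcc := (ih'.2 c.1).mp hcovc
                have hgt : le < c.1 := by
                  rcases hcc.1 with ⟨q, hq, hq1, _⟩
                  have := hltb q hq
                  omega
                refine List.isChain_cons_cons.mpr ⟨?_, ?_⟩
                · have := min_le_left le re
                  simp
                  omega
                · rw [← hM']
                  exact ih'.1.1
            · intro q hq
              rcases List.mem_cons.mp hq with rfl | hq'
              · simpa using hse
              · exact ih'.1.2 q hq'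
            · intro x
              rw [covP_cons, ih'.2 x, covP_cons, covP_cons]
              simp only
              constructor
              · rintro (⟨h1, h2⟩ | ⟨hclt, hcR⟩)
                · have e1 := le_max_left ls rs
                  have e2 := le_max_right ls rs
                  have m1 := min_le_left le re
                  have m2 := min_le_right le re
                  exact ⟨Or.inl ⟨by omega, by omega⟩, Or.inl ⟨by omega, by omega⟩⟩
                · exact ⟨Or.inr hclt, hcR⟩
              · rintro ⟨hl | hclt, hr | hcrt⟩
                · exact Or.inl ⟨max_le hl.1 hr.1, lt_min hl.2 hr.2⟩
                · exfalso
                  have := covP_lb hrtb hcrt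
                  omega
                · exact Or.inr ⟨hclt, Or.inl hr⟩
                · exact Or.inr ⟨hclt, Or.inr hcrt⟩
          · rw [heq, if_neg hse, List.nil_append]
            refine ⟨ih'.1, ?_⟩
            intro x
            rw [ih'.2 x, covP_cons (ls, le)]
            simp only
            constructor
            · rintro ⟨hclt, hcR⟩
              exact ⟨Or.inr hclt, hcR⟩
            · rintro ⟨hl | hclt, hR'⟩
              · exfalso
                rcases (covP_cons _ _ _).mp hR' with ⟨hr1, hr2⟩ | hcrt
                · simp only at hr1 hr2
                  exact hse (lt_of_le_of_lt (max_le hl.1 hr1) (lt_min hl.2 hr2))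
                · have := covP_lb hrtb hcrt
                  omega
              · exact ⟨hclt, hR'⟩
        · have ih' := ih ((ls, le) :: lt) rt (by simp at hn ⊢; omega) hL hRt
          have heq : pvILoop ((ls, le) :: lt) ((rs, re) :: rt) =
              (if max ls rs < min le re then [(max ls rs, min le re)] else []) ++
                pvILoop ((ls, le) :: lt) rt := by
            rw [pvILoop]
            simp [hle]
          by_cases hse : max ls rs < min le re
          · rw [heq, if_pos hse, List.singleton_append]
            refine ⟨⟨?_, ?_⟩, ?_⟩
            · rcases hM' : pvILoop ((ls, le) :: lt) rt with _ | ⟨c, t⟩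
              · simp
              · have hcv : c.1 < c.2 := ih'.1.2 c (by rw [hM']; simp)
                have hcovc : covP (pvILoop ((ls, le) :: lt) rt) c.1 := by
                  rw [hM']
                  exact (covP_cons _ _ _).mpr (Or.inl ⟨le_rfl, hcv⟩)
                have hcc := (ih'.2 c.1).mp hcovc
                have hgt : re < c.1 := by
                  rcases hcc.2 with ⟨q, hq, hq1, _⟩
                  have := hrtb q hq
                  omega
                refine List.isChain_cons_cons.mpr ⟨?_, ?_⟩
                · have := min_le_right le re
                  simp
                  omega
                · rw [← hM']
                  exact ih'.1.1
            · intro q hq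
              rcases List.mem_cons.mp hq with rfl | hq'
              · simpa using hse
              · exact ih'.1.2 q hq'
            · intro x
              rw [covP_cons, ih'.2 x, covP_cons (rs, re)]
              simp only
              constructor
              · rintro (⟨h1, h2⟩ | ⟨hcL, hcrt⟩)
                · have e1 := le_max_left ls rs
                  have e2 := le_max_right ls rs
                  have m1 := min_le_left le re
                  have m2 := min_le_right le re
                  exact ⟨(covP_cons _ _ _).mpr (Or.inl ⟨by omega, by omega⟩), Or.inl ⟨by omega, by omega⟩⟩
                · exact ⟨hcL, Or.inr hcrt⟩
              · rintro ⟨hcL, hr | hcrt⟩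
                · rcases (covP_cons _ _ _).mp hcL with ⟨hl1, hl2⟩ | hclt
                  · simp only at hl1 hl2
                    exact Or.inl ⟨max_le hl1 hr.1, lt_min hl2 hr.2⟩
                  · exfalso
                    have := covP_lb hltb hclt
                    omega
                · exact Or.inr ⟨hcL, hcrt⟩
          · rw [heq, if_neg hse, List.nil_append]
            refine ⟨ih'.1, ?_⟩
            intro x
            rw [ih'.2 x, covP_cons (rs, re)]
            simp only
            constructor
            · rintro ⟨hcL, hcrt⟩
              exact ⟨hcL, Or.inr hcrt⟩
            · rintro ⟨hcL, hr | hcrt⟩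
              · exfalso
                rcases (covP_cons _ _ _).mp hcL with ⟨hl1, hl2⟩ | hclt
                · simp only at hl1 hl2
                  exact hse (lt_of_le_of_lt (max_le hl1 hr.1) (lt_min hl2 hr.2))
                · have := covP_lb hltb hclt
                  omega
              · exact ⟨hcL, hcrt⟩

lemma pieces_cov (L R : List (Int × Int)) (x : Int) :
    covP (L.flatMap fun l => R.filterMap fun r =>
        if max l.1 r.1 < min l.2 r.2 then some (max l.1 r.1, min l.2 r.2) else none) x
      ↔ (covP L x ∧ covP R x) := by
  constructor
  · rintro ⟨p, hp, h1, h2⟩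
    rw [List.mem_flatMap] at hp
    obtain ⟨l, hl, hpl⟩ := hp
    rw [List.mem_filterMap] at hpl
    obtain ⟨r, hr, hif⟩ := hpl
    split_ifs at hif with hc
    · cases hif
      simp only at h1 h2
      exact ⟨⟨l, hl, le_trans (le_max_left _ _) h1, lt_of_lt_of_le h2 (min_le_left _ _)⟩,
             ⟨r, hr, le_trans (le_max_right _ _) h1, lt_of_lt_of_le h2 (min_le_right _ _)⟩⟩
  · rintro ⟨⟨l, hl, hl1, hl2⟩, ⟨r, hr, hr1, hr2⟩⟩
    refine ⟨(max l.1 r.1, min l.2 r.2), ?_, max_le hl1 hr1, lt_min hl2 hr2⟩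
    rw [List.mem_flatMap]
    refine ⟨l, hl, ?_⟩
    rw [List.mem_filterMap]
    exact ⟨r, hr, by rw [if_pos (lt_of_le_of_lt (max_le hl1 hr1) (lt_min hl2 hr2))]⟩

lemma pieces_valid (L R : List (Int × Int)) :
    ∀ p ∈ (L.flatMap fun l => R.filterMap fun r =>
        if max l.1 r.1 < min l.2 r.2 then some (max l.1 r.1, min l.2 r.2) else none),
      p.1 < p.2 := by
  intro p hp
  rw [List.mem_flatMap] at hp
  obtain ⟨l, _, hpl⟩ := hp
  rw [List.mem_filterMap] at hpl
  obtain ⟨r, _, hif⟩ := hpl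
  split_ifs at hif with hc
  cases hif
  exact hc

lemma alt_spec (left right : List (Int × Int)) (hl : ¬ (left = [] ∨ right = [])) :
    Canon (intersect_intervals_py_alt left right) ∧
      ∀ x, covP (intersect_intervals_py_alt left right) x ↔
        (covP (left.filter fun p => decide (0 ≤ p.1) && decide (p.1 < p.2)) x ∧
         covP (right.filter fun p => decide (0 ≤ p.1) && decide (p.1 < p.2)) x) := by
  have hperm := PySem.List.sorted_perm
    ((left.filter fun p => decide (0 ≤ p.1) && decide (p.1 < p.2)).flatMap fun l =>
      (right.filter fun p => decide (0 ≤ p.1) && decide (p.1 < p.2)).filterMap fun r =>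
        if max l.1 r.1 < min l.2 r.2 then some (max l.1 r.1, min l.2 r.2) else none)
    (fun p : Int × Int => p.1) false
  have hvalid : ∀ p ∈ (PySem.List.sorted
      ((left.filter fun p => decide (0 ≤ p.1) && decide (p.1 < p.2)).flatMap fun l =>
        (right.filter fun p => decide (0 ≤ p.1) && decide (p.1 < p.2)).filterMap fun r =>
          if max l.1 r.1 < min l.2 r.2 then some (max l.1 r.1, min l.2 r.2) else none)
      (fun p : Int × Int => p.1) false), p.1 < p.2 :=
    fun p hp => pieces_valid _ _ p (hperm.subset hp)
  have hpw := PySem.List.sorted_pairwise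
    ((left.filter fun p => decide (0 ≤ p.1) && decide (p.1 < p.2)).flatMap fun l =>
      (right.filter fun p => decide (0 ≤ p.1) && decide (p.1 < p.2)).filterMap fun r =>
        if max l.1 r.1 < min l.2 r.2 then some (max l.1 r.1, min l.2 r.2) else none)
    (fun p : Int × Int => p.1)
  obtain ⟨hc, hcov⟩ := mergeTop_spec _ hvalid hpw
  have halt : intersect_intervals_py_alt left right = pvMergeTop (PySem.List.sorted
      ((left.filter fun p => decide (0 ≤ p.1) && decide (p.1 < p.2)).flatMap fun l =>
        (right.filter fun p => decide (0 ≤ p.1) && decide (p.1 < p.2)).filterMap fun r =>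
          if max l.1 r.1 < min l.2 r.2 then some (max l.1 r.1, min l.2 r.2) else none)
      (fun p : Int × Int => p.1) false) := by
    simp [intersect_intervals_py_alt, hl]
  refine ⟨halt ▸ hc, ?_⟩
  intro x
  rw [halt, hcov x, covP_perm hperm x, pieces_cov]

-- ===== VERDICT (by name: the statement is the Claim_ definition above) =====
theorem intersect_intervals_py_spec : Claim_equal_intersect_intervals_py := by
  intro left right _ _
  unfold Spec_intersect_intervals_py
  by_cases h : left = [] ∨ right = []
  · simp [intersect_intervals_py, intersect_intervals_py_alt, h]
  · push Not at h
    obtain ⟨hlne, hrne⟩ := h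
    have hor : ¬ (left = [] ∨ right = []) := by simp [hlne, hrne]
    set ml : Int := max (max 0 (pvMaxEnd left)) (pvMaxEnd right) with hml
    have hA : intersect_intervals_py left right =
        pvILoop (pvMergeIntervals left ml) (pvMergeIntervals right ml) := by
      simp [intersect_intervals_py, hlne, hrne, hml]
    have hbl : ∀ p ∈ left, p.2 ≤ ml := by
      intro p hp
      have h1 := maxEnd_bound left p hp
      have h2 := le_max_right (0 : Int) (pvMaxEnd left)
      have h3 := le_max_left (max 0 (pvMaxEnd left)) (pvMaxEnd right)
      omega
    have hbr : ∀ p ∈ right, p.2 ≤ ml := by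
      intro p hp
      have h1 := maxEnd_bound right p hp
      have h3 := le_max_right (max 0 (pvMaxEnd left)) (pvMaxEnd right)
      omega
    obtain ⟨hcL, hcovL⟩ := mergeIntervals_spec left ml hbl
    obtain ⟨hcR, hcovR⟩ := mergeIntervals_spec right ml hbr
    obtain ⟨hcA, hcovA⟩ := iloop_spec
      ((pvMergeIntervals left ml).length + (pvMergeIntervals right ml).length)
      (pvMergeIntervals left ml) (pvMergeIntervals right ml) le_rfl hcL hcR
    obtain ⟨hcB, hcovB⟩ := alt_spec left right hor
    rw [hA]
    apply canon_ext hcA hcB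
    intro x
    rw [hcovA x, hcovB x, hcovL x, hcovR x]
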